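-- pv_equiv track=rewrite | github.com/sbarczyk/WDI | Pycharm/Kolokwia/Kolokwium - rekurencja/19_20_2A_v2.py | operation_C
-- ===== SOURCE A (Python) =====
-- def operation_C(n):
--     px = 1
--     x = 10
--     while n // px > 0:
--         if ((n % x) // px) % 2 == 0:
--             n += px
--         px = x
--         x *= 10
--     return n
-- ===== SOURCE B (Python) =====
-- def operation_C(n):
--     if n <= 0:
--         return n
--     d = n % 10
--     if d % 2 == 0:
--         d += 1
--     return operation_C(n // 10) * 10 + d
-- ===== Notes on version B (the rewrite author's own statement) =====
-- stated objective: simpler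
-- what changed: Replaces the iterative place-value loop that mutates n with growing power-of-ten counters by a direct structural recursion over the digits: since incrementing an even digit never carries, each digit is transformed independently and the number is reassembled by the unwinding recursion.
import Mathlib
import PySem

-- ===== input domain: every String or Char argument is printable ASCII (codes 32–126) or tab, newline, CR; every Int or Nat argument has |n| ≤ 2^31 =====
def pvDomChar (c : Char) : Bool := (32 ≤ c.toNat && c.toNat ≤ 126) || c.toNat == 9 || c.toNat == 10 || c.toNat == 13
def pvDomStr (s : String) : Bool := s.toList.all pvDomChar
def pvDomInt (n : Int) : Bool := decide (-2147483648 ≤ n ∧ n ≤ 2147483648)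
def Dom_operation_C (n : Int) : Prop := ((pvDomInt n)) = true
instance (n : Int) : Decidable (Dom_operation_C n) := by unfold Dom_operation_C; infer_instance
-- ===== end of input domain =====

-- B replaces A's iterative place-value loop (mutating n via px/x counters) by a
-- per-digit structural recursion; equal return values are proved for all Int inputs in Dom.

-- ===== PORT A =====
-- A's while loop, transcribed with an explicit fuel guard (fuel only makes the
-- recursion total; opCLoop_eq below shows 2*n.toNat+2 steps always suffice).
def opCLoop : Nat → Int → Int → Int → Int
  | 0, n, _, _ => n
  | Nat.succ fuel, n, px, x =>
    if PySem.Int.floordiv n px > 0 then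
      opCLoop fuel
        (if PySem.Int.mod (PySem.Int.floordiv (PySem.Int.mod n x) px) 2 = 0 then n + px else n)
        x (x * 10)
    else n

def operation_C (n : Int) : Int := opCLoop (2 * n.toNat + 2) n 1 10

-- ===== PORT B =====
def operation_C_alt (n : Int) : Int :=
  if n ≤ 0 then n
  else
    operation_C_alt (PySem.Int.floordiv n 10) * 10 +
      (if PySem.Int.mod (PySem.Int.mod n 10) 2 = 0 then PySem.Int.mod n 10 + 1
       else PySem.Int.mod n 10)
termination_by n.toNat
decreasing_by
  rw [PySem.Int.floordiv_eq_ediv_of_pos (by norm_num : (0:Int) < 10)]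
  omega

-- ===== PRECONDITION & SPEC =====
def Spec_operation_C (n : Int) (out : Int) : Prop := out = operation_C_alt n
instance (n : Int) (out : Int) : Decidable (Spec_operation_C n out) := by unfold Spec_operation_C; infer_instance

-- ===== CLAIM (what is proved, stated in full; the proofs are below) =====
def Claim_equal_operation_C : Prop := ∀ (n : Int), Dom_operation_C n → Spec_operation_C n (operation_C n)

-- ===== LEMMAS AND PROOFS =====

lemma alt_zero : operation_C_alt 0 = 0 := by
  rw [operation_C_alt]; simp

lemma alt_nonpos {n : Int} (h : n ≤ 0) : operation_C_alt n = n := by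
  rw [operation_C_alt]; simp [h]

lemma alt_pos {n : Int} (h : 0 < n) :
    operation_C_alt n = operation_C_alt (n / 10) * 10 +
      (if (n % 10) % 2 = 0 then n % 10 + 1 else n % 10) := by
  rw [operation_C_alt,
    PySem.Int.floordiv_eq_ediv_of_pos (by norm_num : (0:Int) < 10),
    PySem.Int.mod_eq_emod_of_pos (by norm_num : (0:Int) < 10),
    PySem.Int.mod_eq_emod_of_pos (by norm_num : (0:Int) < 2)]
  simp [not_le.mpr h]

lemma key_div {q r m : Int} (h0 : 0 ≤ r) (h1 : r < m) : (q * m + r) / m = q := by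
  have hm : m ≠ 0 := by omega
  rw [add_comm, Int.add_mul_ediv_right _ _ hm, Int.ediv_eq_zero_of_lt h0 h1, zero_add]

lemma key_mod {q r m : Int} (h0 : 0 ≤ r) (h1 : r < m) : (q * m + r) % m = r := by
  rw [add_comm, mul_comm, Int.add_mul_emod_self_left, Int.emod_eq_of_lt h0 h1]

-- loop invariant: with px > 0, x = 10*px and n = a*px + r (0 ≤ r < px, digits below
-- position of px already transformed), enough fuel gives  alt a * px + r.
lemma opCLoop_eq (fuel : Nat) : ∀ (a r px : Int), 0 < px → 0 ≤ r → r < px → 0 ≤ a →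
    a.toNat < fuel →
    opCLoop fuel (a * px + r) px (10 * px) = operation_C_alt a * px + r := by
  induction fuel with
  | zero => intro a r px _ _ _ _ hf; omega
  | succ fuel ih =>
    intro a r px hpx hr0 hr1 ha0 hf
    have hguard : PySem.Int.floordiv (a * px + r) px = a := by
      rw [PySem.Int.floordiv_eq_ediv_of_pos hpx, key_div hr0 hr1]
    rcases eq_or_lt_of_le ha0 with hz | hpos
    · -- a = 0 : loop never runs
      subst hz
      simp only [opCLoop]
      rw [hguard]
      simp [alt_zero]
    · -- a > 0 : one loop iteration, then the induction hypothesis at 10*px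
      set b : Int := a / 10 with hb
      set d0 : Int := a % 10 with hd0
      have hd0b : 0 ≤ d0 ∧ d0 ≤ 9 := by constructor <;> omega
      have hsplit : a * px + r = b * (10 * px) + (d0 * px + r) := by
        have : a = 10 * b + d0 := by omega
        rw [this]; ring
      have hrb0 : 0 ≤ d0 * px + r := by nlinarith
      have hrb1 : d0 * px + r < 10 * px := by nlinarith
      have hmodx : PySem.Int.mod (a * px + r) (10 * px) = d0 * px + r := by
        rw [PySem.Int.mod_eq_emod_of_pos (by omega), hsplit, key_mod hrb0 hrb1]
      have hdigit : PySem.Int.floordiv (d0 * px + r) px = d0 := by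
        rw [PySem.Int.floordiv_eq_ediv_of_pos hpx, key_div hr0 hr1]
      have hcond : PySem.Int.mod (PySem.Int.floordiv (PySem.Int.mod (a * px + r) (10 * px)) px) 2
          = d0 % 2 := by
        rw [hmodx, hdigit, PySem.Int.mod_eq_emod_of_pos (by norm_num : (0:Int) < 2)]
      have hb0 : 0 ≤ b := by omega
      have hbf : b.toNat < fuel := by omega
      have hx10 : 10 * px * 10 = 10 * (10 * px) := by ring
      rw [show opCLoop (Nat.succ fuel) (a * px + r) px (10 * px)
          = if PySem.Int.floordiv (a * px + r) px > 0 then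
              opCLoop fuel
                (if PySem.Int.mod (PySem.Int.floordiv (PySem.Int.mod (a * px + r) (10 * px)) px) 2 = 0
                 then a * px + r + px else a * px + r)
                (10 * px) (10 * px * 10)
            else a * px + r from rfl,
        hguard, if_pos hpos, hcond, hx10]
      by_cases hev : d0 % 2 = 0
      · have hd8 : d0 ≤ 8 := by omega
        have hsplit' : a * px + r + px = b * (10 * px) + ((d0 + 1) * px + r) := by
          rw [hsplit]; ring
        have hrb1' : (d0 + 1) * px + r < 10 * px := by nlinarith
        rw [if_pos hev, hsplit',
          ih b ((d0 + 1) * px + r) (10 * px) (by omega) (by nlinarith) hrb1' hb0 hbf,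
          alt_pos hpos, ← hb, ← hd0, if_pos hev]
        ring
      · rw [if_neg hev, hsplit,
          ih b (d0 * px + r) (10 * px) (by omega) hrb0 hrb1 hb0 hbf,
          alt_pos hpos, ← hb, ← hd0, if_neg hev]
        ring

-- ===== VERDICT (by name: the statement is the Claim_ definition above) =====
theorem operation_C_spec : Claim_equal_operation_C := by
  intro n _
  unfold Spec_operation_C operation_C
  rcases le_or_gt n 0 with h | h
  · -- guard n // 1 > 0 is false; both sides return n
    simp [opCLoop, not_lt.mpr h, alt_nonpos h]
  · have := opCLoop_eq (2 * n.toNat + 2) n 0 1 (by norm_num) le_rfl (by norm_num)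
      (le_of_lt h) (by omega)
    simpa using this
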